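-- pv_equiv track=rewrite | github.com/MajidNoorani/bayes-and-Naive-Bayes | My_functions.py | new_data
-- ===== SOURCE A (Python) =====
-- import collections
--
-- def new_data(data):
--     ########### extracting the feature values in train_set and dedicating numerical values to each one #################
--     data_copy = []
--     values_complete = []
--     values = []
--     transposed_train_set = list(map(list, zip(*data)))
--     for i in range(len(data[0])):
--         values_complete.append(collections.Counter(transposed_train_set[i]))
--         values.append(sorted(values_complete[i].keys()))
--
--     new_values = {}
--     for i in range(len(values)):
--         new_values[i] = []
--         for j in range(len(values[i])):
--             new_values[i].append(j)
--     ##############################################################################################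
--
--     for q in range(len(data)):
--         a = []
--         for i in range(len(values)):
--
--             if data[q][i] in values[i]:
--                 a.append(new_values[i][values[i].index(data[q][i])])
--             else:
--                 a.append(-1)
--         data_copy.append(a)
--
--
--     return data_copy
-- ===== SOURCE B (Python) =====
-- def new_data(data):
--     # per column: sort (value, row) pairs once, sweep them assigning a dense rank
--     # that increments when the value changes; no value->index table, no per-cell scan
--     ncols = len(data[0])
--     nrows = len(data)
--     rank_cols = []
--     for i in range(ncols):
--         pairs = sorted([(data[q][i], q) for q in range(nrows)], key=lambda p: p[0])
--         ranks = [0] * nrows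
--         rank = 0
--         prev = pairs[0][0]
--         for v, q in pairs:
--             if v != prev:
--                 rank += 1
--                 prev = v
--             ranks[q] = rank
--         rank_cols.append(ranks)
--     return [[rank_cols[i][q] for i in range(ncols)] for q in range(nrows)]
-- ===== Notes on version B (the rewrite author's own statement) =====
-- stated objective: faster
-- what changed: A builds a per-column Counter, a sorted distinct-value list and a value-to-rank table, then resolves every cell with a membership test plus a linear .index scan; B instead sorts the (value, row) pairs of each column once and sweeps them with a dense rank that increments on value change, writing ranks back by row index, so no per-cell scan or lookup table exists.
import Mathlib
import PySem

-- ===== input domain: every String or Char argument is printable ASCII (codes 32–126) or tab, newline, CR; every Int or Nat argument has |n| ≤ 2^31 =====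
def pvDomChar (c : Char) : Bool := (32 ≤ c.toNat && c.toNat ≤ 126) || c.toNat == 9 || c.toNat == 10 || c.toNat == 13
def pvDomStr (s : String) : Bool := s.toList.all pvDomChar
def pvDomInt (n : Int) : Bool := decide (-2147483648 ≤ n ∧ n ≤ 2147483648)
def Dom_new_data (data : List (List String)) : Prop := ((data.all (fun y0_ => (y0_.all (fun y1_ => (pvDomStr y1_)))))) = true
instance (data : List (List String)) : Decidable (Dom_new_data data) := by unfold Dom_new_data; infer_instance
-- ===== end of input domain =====

-- B replaces A's per-column Counter + sorted key list + per-cell membership/.index lookup by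
-- one sort of (value, row) pairs per column followed by a single dense-rank sweep (faster).

-- ===== PORT A =====
-- zip(*data) as list of lists: columns up to the shortest row
def pyZipStar (data : List (List String)) : List (List String) :=
  match data with
  | [] => []
  | r0 :: _ =>
      (List.range (data.foldl (fun m r => min m r.length) r0.length)).map
        (fun i => data.map (fun r => r.getD i ""))

def new_data (data : List (List String)) : List (List Int) :=
  let transposed := pyZipStar data
  -- loop 1: values_complete[i] = Counter(transposed[i]); values[i] = sorted(keys)
  let valuesComplete := (List.range (data.headD []).length).map
      (fun i => PySem.Dict.counter (transposed.getD i []))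
  let values := valuesComplete.map (fun c => PySem.List.sorted c.keys (fun x => x) false)
  -- loop 2: new_values[i] = [0, 1, …, len(values[i])-1]; the dict's keys are exactly
  -- 0..len(values)-1 in order, so it is modeled positionally as a list indexed by i
  let newValues := values.map (fun v => (List.range v.length).map (fun (j : Nat) => (j : Int)))
  -- loop 3: rows of data_copy
  data.foldl (fun dataCopy row =>
    dataCopy ++ [(List.range values.length).foldl (fun a i =>
      let vi := values.getD i []
      a ++ [if row.getD i "" ∈ vi then
              (newValues.getD i []).getD ((PySem.List.index? vi (row.getD i "")).getD 0) (-1)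
            else -1]) []]) []

-- ===== PORT B =====
-- body of Source B's inner for-loop: 'if v != prev: rank += 1; prev = v' then 'ranks[q] = rank'
def sweepStep (st : List Int × Int × String) (p : String × Nat) : List Int × Int × String :=
  if p.1 ≠ st.2.2 then (st.1.set p.2 (st.2.1 + 1), st.2.1 + 1, p.1)
  else (st.1.set p.2 st.2.1, st.2.1, st.2.2)

def new_data_alt (data : List (List String)) : List (List Int) :=
  let ncols := (data.headD []).length
  let nrows := data.length
  let rankCols := (List.range ncols).map (fun i =>
    let pairs := PySem.List.sorted
        ((List.range nrows).map (fun q => ((data.getD q []).getD i "", q)))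
        (fun p => p.1) false
    (pairs.foldl sweepStep
        (List.replicate nrows 0, 0, (pairs.headD ("", 0)).1)).1)
  (List.range nrows).map (fun q =>
    (List.range ncols).map (fun i => (rankCols.getD i []).getD q 0))

-- ===== PRECONDITION & SPEC =====
-- Pre_ excludes exactly the inputs where A raises: empty data (data[0] IndexError) and
-- data whose first row is longer than some later row (IndexError on transposed_train_set[i] or data[q][i])
def Pre_new_data (data : List (List String)) : Prop :=
  data ≠ [] ∧ ∀ r ∈ data, (data.headD []).length ≤ r.length
instance (data : List (List String)) : Decidable (Pre_new_data data) := by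
  unfold Pre_new_data; infer_instance

def pvWitness_new_data : List (List String) := [["b", "a"], ["a", "a"]]

def Spec_new_data (data : List (List String)) (out : List (List Int)) : Prop := out = new_data_alt data
instance (data : List (List String)) (out : List (List Int)) : Decidable (Spec_new_data data out) := by unfold Spec_new_data; infer_instance

-- ===== CLAIM (what is proved, stated in full; the proofs are below) =====
def Claim_equal_new_data : Prop := ∀ (data : List (List String)), Dom_new_data data → Pre_new_data data → Spec_new_data data (new_data data)

-- ===== LEMMAS AND PROOFS =====

-- the common value both programs compute per cell: number of distinct column values below v
def cntLt (col : List String) (v : String) : Int :=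
  (((PySem.Set.ofList col).countP (fun d => decide (d < v))) : Int)

lemma getD_map_range' {α : Type} (f : Nat → α) (n i : Nat) (d : α) (h : i < n) :
    ((List.range n).map f).getD i d = f i := by
  simp [List.getD, h]

lemma getD_map2_range {α β : Type} (g : Nat → α) (f : α → β) (n i : Nat) (d : β) (h : i < n) :
    ((((List.range n).map g).map f)).getD i d = f (g i) := by
  simp [List.getD, h]

lemma getD_map3_range {α β γ : Type} (g : Nat → α) (f : α → β) (h2 : β → γ) (n i : Nat)
    (d : γ) (h : i < n) :
    (((((List.range n).map g).map f).map h2)).getD i d = h2 (f (g i)) := by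
  simp [List.getD, h]

lemma getD_set_self (l : List Int) (q : Nat) (v : Int) (h : q < l.length) :
    (l.set q v).getD q 0 = v := by
  simp [List.getD, h]

lemma getD_set_ne (l : List Int) (q q' : Nat) (v : Int) (h : q' ≠ q) :
    (l.set q v).getD q' 0 = l.getD q' 0 := by
  simp [List.getD, List.getElem?_set_ne (Ne.symm h)]

lemma le_foldl_min_len (c : Nat) :
    ∀ (l : List (List String)) (init : Nat), c ≤ init → (∀ r ∈ l, c ≤ r.length) →
      c ≤ l.foldl (fun m r => min m r.length) init := by
  intro l
  induction l with
  | nil => intro init h _; simpa using h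
  | cons r t ih =>
      intro init h hall
      simp only [List.foldl_cons]
      exact ih _ (le_min h (hall r (by simp))) (fun s hs => hall s (by simp [hs]))

-- ===== A-side: the .index lookup in the sorted distinct list is cntLt =====

-- index of x in a strictly increasing list = number of elements below x
lemma index?_of_pairwise_lt {α : Type} [LinearOrder α] :
    ∀ (s : List α), s.Pairwise (· < ·) → ∀ x ∈ s,
      PySem.List.index? s x = some (s.countP (fun d => decide (d < x))) := by
  intro s
  induction s with
  | nil => intro _ x hx; simp at hx
  | cons a t ih =>
      intro hp x hx
      have hlt : ∀ b ∈ t, a < b := (List.pairwise_cons.mp hp).1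
      rcases List.mem_cons.mp hx with rfl | hxt
      · rw [PySem.List.index?_cons_self]
        have h0 : t.countP (fun d => decide (d < x)) = 0 := by
          rw [List.countP_eq_zero]
          intro b hb
          simp [not_lt.mpr (le_of_lt (hlt b hb))]
        simp [h0]
      · have hax : a < x := hlt x hxt
        rw [PySem.List.index?_cons_of_ne _ (ne_of_lt hax),
            ih (List.pairwise_cons.mp hp).2 x hxt]
        simp [hax]

lemma index?_sorted_nodup {α : Type} [LinearOrder α] (l : List α) (hnd : l.Nodup)
    (x : α) (hx : x ∈ l) :
    PySem.List.index? (PySem.List.sorted l (fun y => y) false) x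
      = some (l.countP (fun d => decide (d < x))) := by
  set s := PySem.List.sorted l (fun y => y) false with hs
  have hperm : s.Perm l := PySem.List.sorted_perm l (fun y => y) false
  have hsnd : s.Nodup := hperm.symm.nodup hnd
  have hle : s.Pairwise (· ≤ ·) := by
    simpa using PySem.List.sorted_pairwise l (fun y => y)
  have hplt : s.Pairwise (· < ·) := by
    have := List.Pairwise.and hle hsnd
    exact this.imp (fun h => lt_of_le_of_ne h.1 h.2)
  rw [index?_of_pairwise_lt s hplt x (hperm.mem_iff.mpr hx), hperm.countP_eq]

-- A's per-cell expression equals cntLt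
lemma cell_eq (col : List String) (x : String) (hx : x ∈ col) :
    (if x ∈ PySem.List.sorted (PySem.Dict.counter col).keys (fun y => y) false then
       ((List.range (PySem.List.sorted (PySem.Dict.counter col).keys (fun y => y) false).length).map
           (fun (j : Nat) => (j : Int))).getD
         ((PySem.List.index? (PySem.List.sorted (PySem.Dict.counter col).keys (fun y => y) false) x).getD 0)
         (-1)
     else -1)
    = cntLt col x := by
  have hkeys : (PySem.Dict.counter col).keys = PySem.Set.ofList col :=
    PySem.Dict.keys_counter col
  rw [hkeys]
  set S := PySem.Set.ofList col with hS
  have hnd : S.Nodup := PySem.Set.nodup_ofList col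
  have hxS : x ∈ S := (PySem.Set.mem_ofList col x).mpr hx
  set vi := PySem.List.sorted S (fun y => y) false with hvi
  have hidx : PySem.List.index? vi x = some (S.countP (fun d => decide (d < x))) :=
    index?_sorted_nodup S hnd x hxS
  have hmem : x ∈ vi := by
    rw [hvi, PySem.List.mem_sorted]; exact hxS
  obtain ⟨hk, -, -⟩ := PySem.List.getElem_of_index?_eq_some hidx
  rw [if_pos hmem, hidx]
  simp only [Option.getD_some]
  exact getD_map_range' (fun (j : Nat) => (j : Int)) vi.length _ (-1) hk

-- ===== B-side: the dense-rank sweep computes cntLt =====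

lemma cntLt_min (col : List String) (prev : String) (hmin : ∀ d ∈ col, prev ≤ d) :
    cntLt col prev = 0 := by
  unfold cntLt
  have h0 : (PySem.Set.ofList col).countP (fun d => decide (d < prev)) = 0 := by
    rw [List.countP_eq_zero]
    intro d hd
    have hdc : d ∈ col := (PySem.Set.mem_ofList col d).mp hd
    exact fun hc => absurd (of_decide_eq_true hc) (not_lt.mpr (hmin d hdc))
  rw [h0]
  rfl

lemma countP_le_split (prev : String) :
    ∀ (S : List String), S.Nodup → prev ∈ S →
      S.countP (fun d => decide (d ≤ prev)) = S.countP (fun d => decide (d < prev)) + 1 := by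
  intro S
  induction S with
  | nil => intro _ h; simp at h
  | cons a t ih =>
      intro hnd hmem
      have hndt : t.Nodup := (List.nodup_cons.mp hnd).2
      have hnin : a ∉ t := (List.nodup_cons.mp hnd).1
      rw [List.countP_cons, List.countP_cons]
      rcases List.mem_cons.mp hmem with heq | hmt
      · subst heq
        have ht : t.countP (fun d => decide (d ≤ prev)) = t.countP (fun d => decide (d < prev)) := by
          apply List.countP_congr
          intro d hd
          have hda : d ≠ prev := fun h => hnin (h ▸ hd)
          by_cases hdl : d < prev
          · rw [decide_eq_true hdl, decide_eq_true (le_of_lt hdl)]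
          · have hnl : ¬ d ≤ prev := fun hle => hdl (lt_of_le_of_ne hle hda)
            rw [decide_eq_false hnl, decide_eq_false hdl]
        rw [ht, decide_eq_true (le_refl prev), decide_eq_false (lt_irrefl prev)]
        simp
      · have h1 : decide (a ≤ prev) = decide (a < prev) := by
          have hap : a ≠ prev := fun h => hnin (h ▸ hmt)
          by_cases hdl : a < prev
          · rw [decide_eq_true hdl, decide_eq_true (le_of_lt hdl)]
          · have hnl : ¬ a ≤ prev := fun hle => hdl (lt_of_le_of_ne hle hap)
            rw [decide_eq_false hnl, decide_eq_false hdl]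
        rw [h1, ih hndt hmt]
        cases hdl : decide (a < prev) <;> simp

lemma cntLt_succ (col : List String) (prev v : String) (hprev : prev ∈ col) (hlt : prev < v)
    (hcover : ∀ d ∈ col, d < v → d ≤ prev) :
    cntLt col v = cntLt col prev + 1 := by
  unfold cntLt
  set S := PySem.Set.ofList col with hS
  have hnd : S.Nodup := PySem.Set.nodup_ofList col
  have hmemS : prev ∈ S := (PySem.Set.mem_ofList col prev).mpr hprev
  have h1 : S.countP (fun d => decide (d < v)) = S.countP (fun d => decide (d ≤ prev)) := by
    apply List.countP_congr
    intro d hd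
    have hdcol : d ∈ col := (PySem.Set.mem_ofList col d).mp hd
    by_cases hdp : d ≤ prev
    · rw [decide_eq_true (lt_of_le_of_lt hdp hlt), decide_eq_true hdp]
    · have hnv : ¬ d < v := fun h => hdp (hcover d hdcol h)
      rw [decide_eq_false hnv, decide_eq_false hdp]
  rw [h1, countP_le_split prev S hnd hmemS]
  push_cast
  ring

-- the sweep invariant: rank always equals cntLt of the last value seen, every value
-- strictly below a remaining value is ≤ that last value
lemma sweep_spec (col : List String) :
    ∀ (ps : List (String × Nat)) (ranks : List Int) (rank : Int) (prev : String),
      ps.Pairwise (fun a b => a.1 ≤ b.1) →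
      (∀ p ∈ ps, prev ≤ p.1) →
      (∀ p ∈ ps, p.1 ∈ col) →
      (ps.map Prod.snd).Nodup →
      (∀ p ∈ ps, p.2 < ranks.length) →
      prev ∈ col →
      rank = cntLt col prev →
      (∀ d ∈ col, d ≤ prev ∨ ∃ p ∈ ps, p.1 = d) →
      (∀ p ∈ ps, (ps.foldl sweepStep (ranks, rank, prev)).1.getD p.2 0 = cntLt col p.1) ∧
      (∀ q, q ∉ ps.map Prod.snd → (ps.foldl sweepStep (ranks, rank, prev)).1.getD q 0 = ranks.getD q 0) := by
  intro ps
  induction ps with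
  | nil => intro ranks rank prev _ _ _ _ _ _ _ _; exact ⟨by simp, fun q _ => rfl⟩
  | cons hd t ih =>
      intro ranks rank prev hsort hprevle hmemcol hnodup hlen hprevmem hrank hcover
      obtain ⟨v, q⟩ := hd
      have hvle : ∀ p ∈ t, v ≤ p.1 := by
        intro p hp; exact (List.pairwise_cons.mp hsort).1 p hp
      simp only [List.map_cons] at hnodup
      have hqnin : q ∉ t.map Prod.snd := (List.nodup_cons.mp hnodup).1
      have hnodupt : (t.map Prod.snd).Nodup := (List.nodup_cons.mp hnodup).2
      have hqlen : q < ranks.length := hlen (v, q) (by simp)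
      by_cases hvp : v = prev
      · -- no rank change
        subst hvp
        have hstep : sweepStep (ranks, rank, v) (v, q) = (ranks.set q rank, rank, v) := by
          simp [sweepStep]
        rw [List.foldl_cons, hstep]
        have iht := ih (ranks.set q rank) rank v
          (List.pairwise_cons.mp hsort).2
          (fun p hp => hvle p hp)
          (fun p hp => hmemcol p (by simp [hp]))
          hnodupt
          (fun p hp => by simpa using hlen p (by simp [hp]))
          hprevmem hrank
          (by
            intro d hd
            rcases hcover d hd with h | ⟨p, hp, hpd⟩
            · exact Or.inl h
            · rcases List.mem_cons.mp hp with rfl | hpt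
              · exact Or.inl (le_of_eq hpd.symm)
              · exact Or.inr ⟨p, hpt, hpd⟩)
        refine ⟨?_, ?_⟩
        · intro p hp
          rcases List.mem_cons.mp hp with rfl | hpt
          · rw [iht.2 q hqnin, getD_set_self ranks q rank hqlen, hrank]
          · exact iht.1 p hpt
        · intro q' hq'
          have hq'q : q' ≠ q := by simp at hq'; exact fun h => hq'.1 h
          have hq't : q' ∉ t.map Prod.snd := by simp at hq' ⊢; exact hq'.2
          rw [iht.2 q' hq't, getD_set_ne ranks q q' rank hq'q]
      · -- value changed: rank increments
        have hlt : prev < v := lt_of_le_of_ne (hprevle (v, q) (by simp)) (fun h => hvp h.symm)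
        have hvcol : v ∈ col := hmemcol (v, q) (by simp)
        have hcov_v : ∀ d ∈ col, d < v → d ≤ prev := by
          intro d hd hdv
          rcases hcover d hd with h | ⟨p, hp, hpd⟩
          · exact h
          · rcases List.mem_cons.mp hp with rfl | hpt
            · exfalso; rw [show d = v from hpd.symm] at hdv; exact lt_irrefl v hdv
            · exact ((not_le.mpr hdv) (hpd ▸ hvle p hpt)).elim
        have hrank' : rank + 1 = cntLt col v := by
          rw [cntLt_succ col prev v hprevmem hlt hcov_v, hrank]
        have hstep : sweepStep (ranks, rank, prev) (v, q) = (ranks.set q (rank + 1), rank + 1, v) := by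
          simp [sweepStep, hvp]
        rw [List.foldl_cons, hstep]
        have iht := ih (ranks.set q (rank + 1)) (rank + 1) v
          (List.pairwise_cons.mp hsort).2
          (fun p hp => hvle p hp)
          (fun p hp => hmemcol p (by simp [hp]))
          hnodupt
          (fun p hp => by simpa using hlen p (by simp [hp]))
          hvcol hrank'
          (by
            intro d hd
            rcases hcover d hd with h | ⟨p, hp, hpd⟩
            · exact Or.inl (le_trans h (le_of_lt hlt))
            · rcases List.mem_cons.mp hp with rfl | hpt
              · exact Or.inl (le_of_eq hpd.symm)
              · exact Or.inr ⟨p, hpt, hpd⟩)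
        refine ⟨?_, ?_⟩
        · intro p hp
          rcases List.mem_cons.mp hp with rfl | hpt
          · rw [iht.2 q hqnin, getD_set_self ranks q (rank + 1) hqlen, hrank']
          · exact iht.1 p hpt
        · intro q' hq'
          have hq'q : q' ≠ q := by simp at hq'; exact fun h => hq'.1 h
          have hq't : q' ∉ t.map Prod.snd := by simp at hq' ⊢; exact hq'.2
          rw [iht.2 q' hq't, getD_set_ne ranks q q' (rank + 1) hq'q]

-- one column of B: the sweep output at row q is cntLt of that row's value
lemma column_ranks (col : List String) (hcol : col ≠ []) (q : Nat) (hq : q < col.length) :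
    (((PySem.List.sorted ((List.range col.length).map (fun q => (col.getD q "", q)))
          (fun p => p.1) false).foldl sweepStep
        (List.replicate col.length 0, 0,
         ((PySem.List.sorted ((List.range col.length).map (fun q => (col.getD q "", q)))
             (fun p => p.1) false).headD ("", 0)).1)).1).getD q 0
      = cntLt col (col.getD q "") := by
  set n := col.length with hn
  set pairsList := (List.range n).map (fun q => (col.getD q "", q)) with hpl
  set ps := PySem.List.sorted pairsList (fun p => p.1) false with hps
  have hperm : ps.Perm pairsList := PySem.List.sorted_perm pairsList (fun p => p.1) false
  have hmem_pl : ∀ p ∈ pairsList, p.2 < n ∧ p.1 = col.getD p.2 "" := by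
    intro p hp
    rw [hpl] at hp
    obtain ⟨j, hj, rfl⟩ := List.mem_map.mp hp
    exact ⟨List.mem_range.mp hj, rfl⟩
  have hgetD_mem : ∀ j, j < n → col.getD j "" ∈ col := by
    intro j hj
    rw [List.getD_eq_getElem col "" (hn ▸ hj)]
    exact List.getElem_mem _
  have hval_pair : ∀ d ∈ col, ∃ p ∈ ps, p.1 = d := by
    intro d hd
    obtain ⟨j, hj, hdj⟩ := List.mem_iff_getElem.mp hd
    refine ⟨(col.getD j "", j), hperm.mem_iff.mpr ?_, by rw [List.getD_eq_getElem col "" hj, hdj]⟩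
    rw [hpl]
    exact List.mem_map.mpr ⟨j, List.mem_range.mpr (hn ▸ hj), rfl⟩
  have hne : ps ≠ [] := by
    rw [hps, Ne, PySem.List.sorted_eq_nil_iff, hpl]
    simp [hn]
    omega
  obtain ⟨p0, t, hcons⟩ := List.exists_cons_of_ne_nil hne
  have hsort : ps.Pairwise (fun a b => a.1 ≤ b.1) := by
    simpa using PySem.List.sorted_pairwise pairsList (fun p => p.1)
  have hprev0 : ∀ p ∈ ps, p0.1 ≤ p.1 := by
    intro p hp
    rw [hcons] at hp hsort
    rcases List.mem_cons.mp hp with rfl | hpt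
    · exact le_refl _
    · exact (List.pairwise_cons.mp hsort).1 p hpt
  have hp0mem : p0.1 ∈ col := by
    have : p0 ∈ ps := by rw [hcons]; simp
    have := hmem_pl p0 (hperm.mem_iff.mp this)
    exact this.2 ▸ hgetD_mem p0.2 this.1
  have hmin0 : ∀ d ∈ col, p0.1 ≤ d := by
    intro d hd
    obtain ⟨p, hp, hpd⟩ := hval_pair d hd
    exact hpd ▸ hprev0 p hp
  have hhead : (ps.headD ("", 0)).1 = p0.1 := by rw [hcons]; rfl
  have hspec := sweep_spec col ps (List.replicate n 0) 0 p0.1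
    hsort hprev0
    (fun p hp => (hmem_pl p (hperm.mem_iff.mp hp)).2 ▸ hgetD_mem p.2 (hmem_pl p (hperm.mem_iff.mp hp)).1)
    (by
      have h2 : (pairsList.map Prod.snd) = List.range n := by
        rw [hpl, List.map_map]
        simp [Function.comp_def]
      exact ((hperm.map Prod.snd).nodup_iff).mpr (h2 ▸ List.nodup_range))
    (fun p hp => by
      rw [List.length_replicate]
      exact (hmem_pl p (hperm.mem_iff.mp hp)).1)
    hp0mem
    (cntLt_min col p0.1 hmin0).symm
    (fun d hd => Or.inr (hval_pair d hd))
  have hpair_mem : (col.getD q "", q) ∈ ps := by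
    apply hperm.mem_iff.mpr
    rw [hpl]
    exact List.mem_map.mpr ⟨q, List.mem_range.mpr hq, rfl⟩
  have := hspec.1 (col.getD q "", q) hpair_mem
  rw [hhead]
  exact this

-- ===== VERDICT (by name: the statement is the Claim_ definition above) =====
theorem new_data_spec : Claim_equal_new_data := by
  intro data _ hpre
  obtain ⟨hne, hlen⟩ := hpre
  obtain ⟨r0, rest, rfl⟩ := List.exists_cons_of_ne_nil hne
  unfold Spec_new_data new_data new_data_alt
  simp only [List.headD_cons] at hlen ⊢
  set dat := r0 :: rest with hdat
  set ncols := r0.length with hncols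
  set nrows := dat.length with hnrows
  have hmin : ncols ≤ dat.foldl (fun m r => min m r.length) r0.length :=
    le_foldl_min_len ncols dat r0.length (le_refl _) hlen
  rw [PySem.List.foldl_append_singleton_eq_map]
  simp only [List.nil_append, List.length_map, List.length_range]
  -- column i as a list over the rows
  have hcolget : ∀ (i q : Nat), q < nrows →
      (dat.map (fun r => r.getD i "")).getD q "" = (dat.getD q []).getD i "" := by
    intro i q hq
    rw [List.getD_eq_getElem _ "" (by simpa using hq), List.getElem_map,
        List.getD_eq_getElem dat [] hq]
  apply List.ext_getElem
  · simp [hnrows]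
  intro q hqa hqb
  have hq : q < nrows := by simpa [hnrows] using hqb
  simp only [List.getElem_map, List.getElem_range]
  rw [PySem.List.foldl_append_singleton_eq_map]
  simp only [List.nil_append]
  apply List.ext_getElem
  · simp
  intro i hia hib
  have hi' : i < ncols := by simpa using hib
  simp only [List.getElem_map, List.getElem_range]
  -- A's cell
  rw [getD_map3_range _ _ _ _ _ _ hi', getD_map2_range _ _ _ _ _ hi']
  have htrans : (pyZipStar dat).getD i [] = dat.map (fun r => r.getD i "") := by
    rw [hdat]
    show ((List.range ((r0 :: rest).foldl (fun m r => min m r.length) r0.length)).map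
        (fun i => (r0 :: rest).map (fun r => r.getD i ""))).getD i [] = _
    exact getD_map_range' _ _ _ _ (lt_of_lt_of_le hi' hmin)
  rw [htrans]
  set col := dat.map (fun r => r.getD i "") with hcol
  have hrow_mem : dat[q] ∈ dat := List.getElem_mem (hnrows ▸ hq)
  have hx : dat[q].getD i "" ∈ col := List.mem_map_of_mem hrow_mem
  rw [cell_eq col (dat[q].getD i "") hx]
  -- B's cell
  rw [getD_map_range' _ _ _ _ hi']
  have hpairs : (List.range nrows).map (fun q => ((dat.getD q []).getD i "", q))
      = (List.range col.length).map (fun q => (col.getD q "", q)) := by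
    have hlen' : col.length = nrows := by simp [hcol, hnrows]
    rw [hlen']
    apply List.map_congr_left
    intro j hj
    rw [hcolget i j (List.mem_range.mp hj)]
  rw [hpairs]
  have hcolne : col ≠ [] := by
    simp [hcol, hdat]
  have hreplen : nrows = col.length := by simp [hcol, hnrows]
  rw [hreplen, column_ranks col hcolne q (by rw [← hreplen]; exact hq)]
  congr 1
  rw [hcolget i q hq, List.getD_eq_getElem dat [] hq]
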